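-- pv_equiv track=rewrite | github.com/amshrestha2020/CodeSignal_Python | Arcade/Intro/Dark_Wilderness/Knapsack_Light.py | solution
-- ===== SOURCE A (Python) =====
-- def solution(value1, weight1, value2, weight2, maxW):
--     # Initialize a 2D table for dynamic programming
--     dp = [[0] * (maxW + 1) for _ in range(3)]
--
--     for i in range(1, 3):
--         for j in range(1, maxW + 1):
--             # Skip the item if it exceeds the current weight capacity
--             if (i == 1 and j < weight1) or (i == 2 and j < weight2):
--                 dp[i][j] = dp[i-1][j]
--             else:
--                 # Take the maximum value of either skipping the item or taking the item
--                 dp[i][j] = max(dp[i-1][j], dp[i-1][j - weight1] + value1) if i == 1 else max(dp[i-1][j], dp[i-1][j - weight2] + value2)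
--
--     return dp[2][maxW]
-- ===== SOURCE B (Python) =====
-- def solution(value1, weight1, value2, weight2, maxW):
--     best = 0
--     if weight1 <= maxW:
--         best = max(best, value1)
--     if weight2 <= maxW:
--         best = max(best, value2)
--     if weight1 + weight2 <= maxW:
--         best = max(best, value1 + value2)
--     return best
-- ===== Notes on version B (the rewrite author's own statement) =====
-- stated objective: faster
-- what changed: Replaced the O(maxW) dynamic-programming table with a direct O(1) enumeration of the four subsets (none, item1, item2, both) under the weight checks.
-- intended difference: On capacity maxW = 0 (where A's j-loop never runs) A returns 0 even when a nonpositive-weight item of positive value fits, and when a zero-weight item1 is paired with an exact-capacity item2 (weight2 = maxW, both values positive) A returns only the better single item because dp[1][0] is never filled; B returns the true best fitting-subset value, the intended knapsack answer. — e.g. on solution(3, 0, 5, 4, 4): A returns 5, B returns 8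
import Mathlib
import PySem

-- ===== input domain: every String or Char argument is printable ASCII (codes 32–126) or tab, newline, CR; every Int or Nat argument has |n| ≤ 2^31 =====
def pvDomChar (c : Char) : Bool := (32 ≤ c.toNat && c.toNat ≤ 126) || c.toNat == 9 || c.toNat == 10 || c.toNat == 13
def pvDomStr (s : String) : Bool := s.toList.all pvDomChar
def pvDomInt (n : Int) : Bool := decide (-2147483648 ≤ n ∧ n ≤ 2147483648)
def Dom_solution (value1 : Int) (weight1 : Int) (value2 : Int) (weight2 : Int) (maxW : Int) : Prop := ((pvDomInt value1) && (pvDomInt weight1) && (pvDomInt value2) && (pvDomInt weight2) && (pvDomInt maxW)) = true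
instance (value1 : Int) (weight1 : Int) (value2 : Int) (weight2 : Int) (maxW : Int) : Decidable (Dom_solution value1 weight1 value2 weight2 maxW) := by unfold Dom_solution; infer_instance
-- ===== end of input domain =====

-- B replaces A's O(maxW) dynamic-programming table by an O(1) enumeration of the
-- four subsets of the two items (none, item1, item2, both) under the weight checks.

-- ===== PORT A =====
-- Literal port of A's DP: three rows of length maxW+1; row i fills cells j = 1..maxW
-- from row i-1 (cell 0 keeps its initial 0); answer is dp[2][maxW].
def solution (value1 : Int) (weight1 : Int) (value2 : Int) (weight2 : Int) (maxW : Int) : Int :=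
  let n := maxW.toNat
  let row0 : List Int := List.replicate (n + 1) 0
  let row1 : List Int := (List.range (n + 1)).map (fun (j : Nat) =>
      if j = 0 then 0
      else if (j : Int) < weight1 then PySem.List.pyGetD row0 (j : Int) 0
      else max (PySem.List.pyGetD row0 (j : Int) 0)
               (PySem.List.pyGetD row0 ((j : Int) - weight1) 0 + value1))
  let row2 : List Int := (List.range (n + 1)).map (fun (j : Nat) =>
      if j = 0 then 0
      else if (j : Int) < weight2 then PySem.List.pyGetD row1 (j : Int) 0
      else max (PySem.List.pyGetD row1 (j : Int) 0)
               (PySem.List.pyGetD row1 ((j : Int) - weight2) 0 + value2))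
  PySem.List.pyGetD row2 maxW 0

-- ===== PORT B =====
def solution_alt (value1 : Int) (weight1 : Int) (value2 : Int) (weight2 : Int) (maxW : Int) : Int :=
  let best : Int := 0
  let best := if weight1 ≤ maxW then max best value1 else best
  let best := if weight2 ≤ maxW then max best value2 else best
  let best := if weight1 + weight2 ≤ maxW then max best (value1 + value2) else best
  best

-- ===== PRECONDITION & SPEC =====
-- Pre_ is exactly A's return domain: A raises IndexError when maxW < 0 (dp rows are
-- empty) and when some weight is negative with maxW >= 1 (dp[j - weight] runs past the row).
def Pre_solution (value1 : Int) (weight1 : Int) (value2 : Int) (weight2 : Int) (maxW : Int) : Prop :=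
  0 ≤ maxW ∧ (maxW = 0 ∨ (0 ≤ weight1 ∧ 0 ≤ weight2))
instance (value1 : Int) (weight1 : Int) (value2 : Int) (weight2 : Int) (maxW : Int) : Decidable (Pre_solution value1 weight1 value2 weight2 maxW) := by unfold Pre_solution; infer_instance
def pvWitness_solution : Int × Int × Int × Int × Int := (3, 2, 5, 4, 9)

-- On capacity maxW = 0 A's j-loop never runs, so it returns 0 even when a zero-weight
-- (or, at maxW = 0, nonpositive-weight) item of positive value fits, and for a
-- zero-weight item 1 paired with an exact-capacity item 2 (weight2 = maxW) A returns
-- only the better single item because dp[1][0] was never filled; B returns the true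
-- best fitting-subset value, which is the intended knapsack answer.
def D_solution (value1 : Int) (weight1 : Int) (value2 : Int) (weight2 : Int) (maxW : Int) : Prop :=
  (maxW = 0 ∧ ((weight1 ≤ 0 ∧ 0 < value1) ∨ (weight2 ≤ 0 ∧ 0 < value2) ∨ (weight1 + weight2 ≤ 0 ∧ 0 < value1 + value2)))
  ∨ (1 ≤ maxW ∧ weight1 = 0 ∧ weight2 = maxW ∧ 0 < value1 ∧ 0 < value2)
instance (value1 : Int) (weight1 : Int) (value2 : Int) (weight2 : Int) (maxW : Int) : Decidable (D_solution value1 weight1 value2 weight2 maxW) := by unfold D_solution; infer_instance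
def pvDiffWitness_solution : Int × Int × Int × Int × Int := (3, 0, 5, 4, 4)
def pvDiffWitnessOut_solution : Int × Int := (5, 8)

def Spec_solution (value1 : Int) (weight1 : Int) (value2 : Int) (weight2 : Int) (maxW : Int) (out : Int) : Prop := ¬ D_solution value1 weight1 value2 weight2 maxW → out = solution_alt value1 weight1 value2 weight2 maxW
instance (value1 : Int) (weight1 : Int) (value2 : Int) (weight2 : Int) (maxW : Int) (out : Int) : Decidable (Spec_solution value1 weight1 value2 weight2 maxW out) := by unfold Spec_solution; infer_instance

-- ===== CLAIM (what is proved, stated in full; the proofs are below) =====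
def Claim_unchanged_solution : Prop := ∀ (value1 : Int) (weight1 : Int) (value2 : Int) (weight2 : Int) (maxW : Int), Dom_solution value1 weight1 value2 weight2 maxW → Pre_solution value1 weight1 value2 weight2 maxW → Spec_solution value1 weight1 value2 weight2 maxW (solution value1 weight1 value2 weight2 maxW)
def Claim_changed_solution : Prop := Dom_solution (pvDiffWitness_solution.1) (pvDiffWitness_solution.2.1) (pvDiffWitness_solution.2.2.1) (pvDiffWitness_solution.2.2.2.1) (pvDiffWitness_solution.2.2.2.2) ∧ Pre_solution (pvDiffWitness_solution.1) (pvDiffWitness_solution.2.1) (pvDiffWitness_solution.2.2.1) (pvDiffWitness_solution.2.2.2.1) (pvDiffWitness_solution.2.2.2.2) ∧ D_solution (pvDiffWitness_solution.1) (pvDiffWitness_solution.2.1) (pvDiffWitness_solution.2.2.1) (pvDiffWitness_solution.2.2.2.1) (pvDiffWitness_solution.2.2.2.2) ∧ solution (pvDiffWitness_solution.1) (pvDiffWitness_solution.2.1) (pvDiffWitness_solution.2.2.1) (pvDiffWitness_solution.2.2.2.1) (pvDiffWitness_solution.2.2.2.2) = pvDiffWitnessOut_solution.1 ∧ solution_alt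 (pvDiffWitness_solution.1) (pvDiffWitness_solution.2.1) (pvDiffWitness_solution.2.2.1) (pvDiffWitness_solution.2.2.2.1) (pvDiffWitness_solution.2.2.2.2) = pvDiffWitnessOut_solution.2 ∧ pvDiffWitnessOut_solution.1 ≠ pvDiffWitnessOut_solution.2
def Claim_exact_solution : Prop := ∀ (value1 : Int) (weight1 : Int) (value2 : Int) (weight2 : Int) (maxW : Int), Dom_solution value1 weight1 value2 weight2 maxW → Pre_solution value1 weight1 value2 weight2 maxW → D_solution value1 weight1 value2 weight2 maxW → solution value1 weight1 value2 weight2 maxW ≠ solution_alt value1 weight1 value2 weight2 maxW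

-- ===== LEMMAS AND PROOFS =====

-- every cell of the all-zero row (and its default) is 0, whatever the index
theorem repl0 (m : Nat) (i : Int) : PySem.List.pyGetD (List.replicate m (0:Int)) i 0 = 0 := by
  unfold PySem.List.pyGetD
  cases h : PySem.List.pyGet? (List.replicate m (0:Int)) i with
  | none => rfl
  | some v =>
    have := PySem.List.mem_of_pyGet?_eq_some (List.replicate m (0:Int)) h
    simp_all

-- cell t of A's row 1, for 0 <= t <= maxW and a nonnegative weight1
theorem row1_getD (value1 weight1 maxW : Int) (t : Nat)
    (hw : 0 ≤ weight1) (ht : t ≤ maxW.toNat) :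
    PySem.List.pyGetD
      ((List.range (maxW.toNat + 1)).map (fun (j : Nat) =>
        if j = 0 then (0 : Int)
        else if (j : Int) < weight1 then PySem.List.pyGetD (List.replicate (maxW.toNat + 1) (0 : Int)) (j : Int) 0
        else max (PySem.List.pyGetD (List.replicate (maxW.toNat + 1) (0 : Int)) (j : Int) 0)
                 (PySem.List.pyGetD (List.replicate (maxW.toNat + 1) (0 : Int)) ((j : Int) - weight1) 0 + value1)))
      (t : Int) 0
    = if t = 0 then 0 else if (t : Int) < weight1 then 0 else max 0 value1 := by
  have ht' : t < maxW.toNat + 1 := by omega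
  rw [PySem.List.pyGetD_natCast]
  rw [List.getD_eq_getElem _ _ (by simpa using ht')]
  simp only [List.getElem_map, List.getElem_range, repl0, zero_add]

-- the closed form of A's result on its return domain (proof-side helper only)
def solAval (value1 weight1 value2 weight2 maxW : Int) : Int :=
  if maxW = 0 then 0
  else if maxW < weight2 then (if maxW < weight1 then 0 else max 0 value1)
  else max (if maxW < weight1 then 0 else max 0 value1)
           ((if maxW - weight2 = 0 then 0 else if maxW - weight2 < weight1 then 0 else max 0 value1) + value2)

theorem solution_eval (value1 weight1 value2 weight2 maxW : Int)
    (h0 : 0 ≤ maxW) (hw : maxW = 0 ∨ (0 ≤ weight1 ∧ 0 ≤ weight2)) :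
    solution value1 weight1 value2 weight2 maxW = solAval value1 weight1 value2 weight2 maxW := by
  rcases eq_or_lt_of_le h0 with h00 | hpos
  · -- maxW = 0: the j-loops are empty and dp[2][0] = 0
    rw [← h00]
    simp [solution, solAval, List.range_succ]
  · rcases hw with h00 | ⟨hw1, hw2⟩
    · omega
    unfold solution
    simp only []
    rw [PySem.List.pyGetD_eq_getElem _ _ h0 (by simp)]
    simp only [List.getElem_map, List.getElem_range]
    rw [row1_getD value1 weight1 maxW maxW.toNat hw1 (le_refl _)]
    have hne : ¬ maxW.toNat = 0 := by omega
    by_cases h2 : ((maxW.toNat : Nat) : Int) < weight2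
    · simp only [if_neg hne, if_pos h2]
      unfold solAval
      split_ifs <;> omega
    · have hsub : ((maxW.toNat : Nat) : Int) - weight2 = (((maxW.toNat - weight2.toNat : Nat)) : Int) := by omega
      rw [hsub, row1_getD value1 weight1 maxW (maxW.toNat - weight2.toNat) hw1 (by omega)]
      simp only [if_neg hne, if_neg h2]
      unfold solAval
      split_ifs <;> omega

theorem solution_spec : Claim_unchanged_solution := by
  intro value1 weight1 value2 weight2 maxW _ hpre hD
  obtain ⟨h0, hw⟩ := hpre
  rw [solution_eval value1 weight1 value2 weight2 maxW h0 hw]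
  unfold D_solution at hD
  unfold solAval solution_alt
  simp only []
  rcases hw with h00 | ⟨hw1, hw2⟩ <;> split_ifs <;> omega

theorem solution_changed : Claim_changed_solution := by
  unfold Claim_changed_solution; decide

theorem solution_tight : Claim_exact_solution := by
  intro value1 weight1 value2 weight2 maxW _ hpre hD
  obtain ⟨h0, hw⟩ := hpre
  rw [solution_eval value1 weight1 value2 weight2 maxW h0 hw]
  unfold D_solution at hD
  unfold solAval solution_alt
  simp only []
  rcases hw with h00 | ⟨hw1, hw2⟩ <;> split_ifs <;> omega
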